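-- pv_equiv track=rewrite | github.com/OscarBrunelle/projects | other/puzzle python/main.py | is_different_color
-- ===== SOURCE A (Python) =====
-- treshold = 20
--
-- def is_different_color(pixel_color1, pixel_color2):
-- 	total_diff = 0
-- 	for i in range(3):
-- 		diff = abs(pixel_color1[i] - pixel_color2[i])
-- 		if diff > treshold:
-- 			return True
-- 		total_diff += abs(pixel_color1[i] - pixel_color2[i])
-- 	if total_diff > treshold:
-- 		return True
-- 	return False
-- ===== SOURCE B (Python) =====
-- treshold = 20
--
-- def is_different_color(pixel_color1, pixel_color2):
--     diffs = [abs(pixel_color1[i] - pixel_color2[i]) for i in range(3)]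
--     def spend(remaining, budget):
--         if budget < 0:
--             return True
--         if not remaining:
--             return False
--         return spend(remaining[1:], budget - remaining[0])
--     return spend(diffs, treshold)
-- ===== Notes on version B (the rewrite author's own statement) =====
-- stated objective: alternative
-- what changed: Replaced A's single-pass accumulate-and-branch loop by a two-stage recursive budget countdown: B first builds the list of absolute channel differences, then recursively spends a remaining budget of 20, returning True exactly when the budget goes negative; no running total or per-channel threshold comparison is kept.
import Mathlib
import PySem

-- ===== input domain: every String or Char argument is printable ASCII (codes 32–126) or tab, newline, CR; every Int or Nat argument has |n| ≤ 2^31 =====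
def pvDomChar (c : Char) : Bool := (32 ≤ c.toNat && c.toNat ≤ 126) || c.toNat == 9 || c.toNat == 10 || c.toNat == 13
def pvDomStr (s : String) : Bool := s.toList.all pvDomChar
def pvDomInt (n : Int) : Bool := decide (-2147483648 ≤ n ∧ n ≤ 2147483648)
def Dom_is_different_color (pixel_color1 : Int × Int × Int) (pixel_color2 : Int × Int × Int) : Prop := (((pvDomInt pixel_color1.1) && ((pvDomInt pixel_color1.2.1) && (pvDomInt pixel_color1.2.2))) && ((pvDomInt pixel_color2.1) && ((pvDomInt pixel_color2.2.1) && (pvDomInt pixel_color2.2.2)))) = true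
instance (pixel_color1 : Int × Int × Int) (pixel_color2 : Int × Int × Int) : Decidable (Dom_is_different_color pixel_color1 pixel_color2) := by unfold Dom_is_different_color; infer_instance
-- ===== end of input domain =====

-- B replaces A's accumulate-and-branch loop by a recursive budget countdown over the
-- list of absolute channel differences (objective: alternative decomposition).

-- ===== PORT A =====
-- A's loop over range(3), unrolled: per-channel early return, then the sum test.
def is_different_color (pixel_color1 : Int × Int × Int) (pixel_color2 : Int × Int × Int) : Bool :=
  let d0 := |pixel_color1.1 - pixel_color2.1|
  if d0 > 20 then true
  else
    let t0 := 0 + d0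
    let d1 := |pixel_color1.2.1 - pixel_color2.2.1|
    if d1 > 20 then true
    else
      let t1 := t0 + d1
      let d2 := |pixel_color1.2.2 - pixel_color2.2.2|
      if d2 > 20 then true
      else
        let t2 := t1 + d2
        if t2 > 20 then true else false

-- ===== PORT B =====
-- Source B's inner 'spend': recursion on the list of remaining diffs, carrying the budget.
def spendBudget : List Int → Int → Bool
  | remaining, budget =>
    if budget < 0 then true
    else
      match remaining with
      | [] => false
      | d :: rest => spendBudget rest (budget - d)

def is_different_color_alt (pixel_color1 : Int × Int × Int) (pixel_color2 : Int × Int × Int) : Bool :=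
  let diffs := [|pixel_color1.1 - pixel_color2.1|, |pixel_color1.2.1 - pixel_color2.2.1|,
                |pixel_color1.2.2 - pixel_color2.2.2|]
  spendBudget diffs 20

-- ===== PRECONDITION & SPEC =====
def Spec_is_different_color (pixel_color1 : Int × Int × Int) (pixel_color2 : Int × Int × Int) (out : Bool) : Prop := out = is_different_color_alt pixel_color1 pixel_color2
instance (pixel_color1 : Int × Int × Int) (pixel_color2 : Int × Int × Int) (out : Bool) : Decidable (Spec_is_different_color pixel_color1 pixel_color2 out) := by unfold Spec_is_different_color; infer_instance

-- ===== CLAIM (what is proved, stated in full; the proofs are below) =====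
def Claim_equal_is_different_color : Prop := ∀ (pixel_color1 : Int × Int × Int) (pixel_color2 : Int × Int × Int), Dom_is_different_color pixel_color1 pixel_color2 → Spec_is_different_color pixel_color1 pixel_color2 (is_different_color pixel_color1 pixel_color2)

-- ===== LEMMAS AND PROOFS =====

-- ===== VERDICT (by name: the statement is the Claim_ definition above) =====
theorem is_different_color_spec : Claim_equal_is_different_color := by
  intro ⟨a0, a1, a2⟩ ⟨b0, b1, b2⟩ _
  unfold Spec_is_different_color is_different_color is_different_color_alt
  have h0 := abs_nonneg (a0 - b0)
  have h1 := abs_nonneg (a1 - b1)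
  have h2 := abs_nonneg (a2 - b2)
  simp only [spendBudget]
  split_ifs <;> first | rfl | (exfalso; omega)
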